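-- pv_equiv track=rewrite | github.com/junchen-deng/phylogenomic_analysis_pipeline | run_fsa.py | RevTrans
-- ===== SOURCE A (Python) =====
-- def RevTrans(aa_align, nucl):    # should be both list of list
--     stop_codon = ['TAA', 'TAG', 'TGA']
--     nucl_align = []
--     for i in range(len(aa_align)):
--         header = aa_align[i][0]
--         nucl_align.append([header,''])
--         aa_seq = aa_align[i][1]
--         nucl_seq = nucl[i][1]
--
--         nucl_seq_clean = ''    # remove potential stop codons captured by hybpiper
--         x = 1
--         for k in range(int(len(nucl_seq)/3)):
--             if nucl_seq[(x-1)*3 : x*3] not in stop_codon: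
--                 nucl_seq_clean += nucl_seq[(x-1)*3 : x*3]
--             x += 1
--
--         nucl_seq = nucl_seq_clean    # now nucl_seq is the same length as aa_seq
--         x = 1
--         for j in range(len(aa_seq)):
--             if aa_seq[j]  != '-':
--                 nucl_align[i][1] += nucl_seq[(x-1)*3 : x*3]
--             else:
--                 nucl_align[i][1] += '---'
--                 x -= 1
--             x += 1
--     return(nucl_align)
-- ===== SOURCE B (Python) =====
-- def RevTrans(aa_align, nucl):    # should be both list of list
--     stop = ('TAA', 'TAG', 'TGA')
--     out = []
--     for a_row, n_row in zip(aa_align, nucl):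
--         ns = n_row[1]
--         clean = ''.join(ns[k:k + 3] for k in range(0, len(ns) // 3 * 3, 3)
--                         if ns[k:k + 3] not in stop)
--         # gap-run decomposition: each maximal run of residues between gaps maps to
--         # one contiguous codon block, sliced out of `clean` in a single step
--         parts = []
--         pos = 0
--         for piece in a_row[1].split('-'):
--             parts.append(clean[3 * pos: 3 * (pos + len(piece))])
--             pos += len(piece)
--         out.append([a_row[0], '---'.join(parts)])
--     return out
-- ===== Notes on version B (the rewrite author's own statement) =====
-- stated objective: alternative
-- what changed: B decomposes the protein row into its gap-separated residue runs with str.split('-') and maps each whole run to one contiguous codon-block slice of the cleaned nucleotide string, joining the blocks with '---'; A instead walks the protein character by character, keeping a codon counter that it decrements on every gap.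
import Mathlib
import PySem

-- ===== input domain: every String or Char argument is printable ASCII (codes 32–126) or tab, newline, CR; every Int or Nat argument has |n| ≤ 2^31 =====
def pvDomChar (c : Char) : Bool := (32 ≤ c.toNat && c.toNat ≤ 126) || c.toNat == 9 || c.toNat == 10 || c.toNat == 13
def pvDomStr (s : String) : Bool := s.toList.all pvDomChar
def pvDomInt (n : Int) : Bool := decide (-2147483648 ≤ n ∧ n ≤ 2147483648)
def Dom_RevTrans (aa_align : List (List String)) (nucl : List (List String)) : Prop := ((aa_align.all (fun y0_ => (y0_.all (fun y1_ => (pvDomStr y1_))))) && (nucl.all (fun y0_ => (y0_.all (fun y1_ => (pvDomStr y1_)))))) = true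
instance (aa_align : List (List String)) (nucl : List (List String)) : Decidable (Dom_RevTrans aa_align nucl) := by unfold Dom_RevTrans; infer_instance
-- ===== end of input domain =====

-- B splits each protein row into its gap-separated residue runs and maps every run to one
-- contiguous codon-block slice of the cleaned nucleotide string, joined with '---',
-- instead of A's per-character walk with the x -= 1 back-stepped codon counter.
-- Objective: alternative decomposition; same asymptotic cost.

-- ===== PORT A =====
def pvStop : List (List Char) := [['T','A','A'],['T','A','G'],['T','G','A']]

-- one step of A's stop-codon-removal loop (state = (nucl_seq_clean, x); k is unused, as in A)
def pvCleanStep (ns : List Char) (st : List Char × Int) (_k : Int) : List Char × Int :=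
  let seg := PySem.List.slice ns (some ((st.2 - 1) * 3)) (some (st.2 * 3))
  (if seg ∈ pvStop then st.1 ++ [] else st.1 ++ seg, st.2 + 1)

-- one step of A's alignment loop (state = (nucl_align[i][1], x))
def pvAlignStep (aa_seq clean : List Char) (st : List Char × Int) (j : Int) : List Char × Int :=
  if PySem.List.pyGetD aa_seq j ' ' ≠ '-' then
    (st.1 ++ PySem.List.slice clean (some ((st.2 - 1) * 3)) (some (st.2 * 3)), st.2 + 1)
  else
    (st.1 ++ ['-','-','-'], (st.2 - 1) + 1)

-- A's loop body for one i (with aa_align[i] and nucl[i] already looked up)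
def pvBodyA (arow nrow : List String) : List String :=
  let header := PySem.List.pyGetD arow 0 ""
  let aa_seq := (PySem.List.pyGetD arow 1 "").toList
  let ns := (PySem.List.pyGetD nrow 1 "").toList
  let clean := ((PySem.List.pyRange 0 (PySem.Int.floordiv (ns.length : Int) 3) 1).foldl
                  (pvCleanStep ns) ([], 1)).1
  let aligned := ((PySem.List.pyRange 0 (aa_seq.length : Int) 1).foldl
                  (pvAlignStep aa_seq clean) ([], 1)).1
  [header, String.ofList aligned]

def RevTrans (aa_align : List (List String)) (nucl : List (List String)) : List (List String) :=
  (PySem.List.pyRange 0 (aa_align.length : Int) 1).foldl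
    (fun acc i =>
      acc ++ [pvBodyA (PySem.List.pyGetD aa_align i []) (PySem.List.pyGetD nucl i [])]) []

-- ===== PORT B =====
-- the full 3-char codons of a nucleotide sequence (B's ns[k:k+3] slices for k in range(0, len//3*3, 3))
def pvChunks3 : List Char → List (List Char)
  | c1 :: c2 :: c3 :: rest => [c1, c2, c3] :: pvChunks3 rest
  | _ => []

-- B's loop body over the gap-split pieces: append the run's codon-block slice, advance pos
def pvPartStep (clean : List Char) (st : List (List Char) × Int) (piece : List Char) :
    List (List Char) × Int :=
  (st.1 ++ [PySem.List.slice clean (some (3 * st.2)) (some (3 * (st.2 + piece.length)))],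
   st.2 + piece.length)

-- B's body for one zipped pair of rows; aa.split('-') is List.splitOn '-' on the char list
def pvBodyB (p : List String × List String) : List String :=
  let header := p.1.getD 0 ""
  let aa_seq := (p.1.getD 1 "").toList
  let ns := (p.2.getD 1 "").toList
  let clean := ((pvChunks3 ns).filter (fun cd => decide (cd ∉ pvStop))).flatten
  let parts := ((aa_seq.splitOn '-').foldl (pvPartStep clean) ([], 0)).1
  [header, String.ofList (List.intercalate ['-','-','-'] parts)]

def RevTrans_alt (aa_align : List (List String)) (nucl : List (List String)) : List (List String) :=
  (aa_align.zip nucl).map pvBodyB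

-- ===== PRECONDITION & SPEC =====
-- Pre_ excludes exactly the inputs where Python A raises IndexError: a row of aa_align
-- (or the paired row of nucl) with fewer than 2 fields, or nucl shorter than aa_align.
def Pre_RevTrans (aa_align : List (List String)) (nucl : List (List String)) : Prop :=
  aa_align.length ≤ nucl.length ∧
  ∀ p ∈ aa_align.zip nucl, 2 ≤ p.1.length ∧ 2 ≤ p.2.length
instance (aa_align : List (List String)) (nucl : List (List String)) : Decidable (Pre_RevTrans aa_align nucl) := by unfold Pre_RevTrans; infer_instance

def pvWitness_RevTrans : List (List String) × List (List String) :=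
  ([["h1", "M-A"]], [["h1", "ATGTAAGCT"]])

def Spec_RevTrans (aa_align : List (List String)) (nucl : List (List String)) (out : List (List String)) : Prop := out = RevTrans_alt aa_align nucl
instance (aa_align : List (List String)) (nucl : List (List String)) (out : List (List String)) : Decidable (Spec_RevTrans aa_align nucl out) := by unfold Spec_RevTrans; infer_instance

-- ===== CLAIM (what is proved, stated in full; the proofs are below) =====
def Claim_equal_RevTrans : Prop := ∀ (aa_align : List (List String)) (nucl : List (List String)), Dom_RevTrans aa_align nucl → Pre_RevTrans aa_align nucl → Spec_RevTrans aa_align nucl (RevTrans aa_align nucl)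

-- ===== LEMMAS AND PROOFS =====

-- any list not matching the 3-cons pattern is short and yields no chunk
theorem chunks3_short {ns : List Char}
    (h : ∀ (c1 c2 c3 : Char) (rest : List Char), ns = c1 :: c2 :: c3 :: rest → False) :
    pvChunks3 ns = [] ∧ ns.length < 3 := by
  match ns with
  | [] => simp [pvChunks3]
  | [a] => simp [pvChunks3]
  | [a, b] => simp [pvChunks3]
  | a :: b :: c :: r => exact absurd rfl (fun hh => h a b c r hh)

theorem chunks3_length (ns : List Char) : (pvChunks3 ns).length = ns.length / 3 := by
  induction ns using pvChunks3.induct with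
  | case1 c1 c2 c3 rest ih => simp [pvChunks3, ih]; omega
  | case2 ns h =>
      obtain ⟨he, hl⟩ := chunks3_short h
      rw [he]; simp; omega

theorem chunks3_mem_length {ns : List Char} {cd : List Char} (h : cd ∈ pvChunks3 ns) :
    cd.length = 3 := by
  induction ns using pvChunks3.induct with
  | case1 c1 c2 c3 rest ih =>
      simp [pvChunks3] at h
      rcases h with h | h
      · simp [h]
      · exact ih h
  | case2 ns h' =>
      obtain ⟨he, _⟩ := chunks3_short h'
      rw [he] at h
      simp at h

theorem chunks3_head {xs : List Char} {cd : List Char} {t : List (List Char)}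
    (h : pvChunks3 xs = cd :: t) : xs.take 3 = cd ∧ pvChunks3 (xs.drop 3) = t := by
  cases xs with
  | nil => simp [pvChunks3] at h
  | cons a xs => cases xs with
    | nil => simp [pvChunks3] at h
    | cons b xs => cases xs with
      | nil => simp [pvChunks3] at h
      | cons c r =>
          simp [pvChunks3] at h
          simp [h.1, h.2]

theorem chunks3_drop (m : Nat) (ns : List Char) :
    pvChunks3 (ns.drop (3 * m)) = (pvChunks3 ns).drop m := by
  induction ns using pvChunks3.induct generalizing m with
  | case1 c1 c2 c3 rest ih =>
      cases m with
      | zero => simp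
      | succ m =>
          have h3 : 3 * (m + 1) = 3 * m + 1 + 1 + 1 := by omega
          rw [h3]
          simp [pvChunks3, List.drop_succ_cons, ih]
  | case2 ns h =>
      obtain ⟨he, hl⟩ := chunks3_short h
      rw [he, List.drop_nil]
      cases m with
      | zero => simpa using he
      | succ m =>
          have : ns.drop (3 * (m + 1)) = [] := List.drop_eq_nil_of_le (by omega)
          rw [this]; simp [pvChunks3]

theorem flatten_drop_of_len3 (codons : List (List Char))
    (h : ∀ cd ∈ codons, cd.length = 3) (m : Nat) :
    codons.flatten.drop (3 * m) = (codons.drop m).flatten := by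
  induction codons generalizing m with
  | nil => simp
  | cons cd rest ih =>
      cases m with
      | zero => simp
      | succ m =>
          have hcd : cd.length = 3 := h cd (by simp)
          have h3 : 3 * (m + 1) = cd.length + 3 * m := by omega
          simp only [List.flatten_cons, h3, List.drop_length_add_append,
            List.drop_succ_cons]
          exact ih (fun cd hcd => h cd (by simp [hcd])) m

theorem flatten_take_of_len3 (codons : List (List Char))
    (h : ∀ cd ∈ codons, cd.length = 3) (m : Nat) :
    codons.flatten.take (3 * m) = (codons.take m).flatten := by
  induction codons generalizing m with
  | nil => simp
  | cons cd rest ih =>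
      cases m with
      | zero => simp
      | succ m =>
          have hcd : cd.length = 3 := h cd (by simp)
          have h3 : 3 * (m + 1) = cd.length + 3 * m := by omega
          simp only [List.flatten_cons, List.take_succ_cons, h3,
            List.take_length_add_append]
          rw [ih (fun cd hcd => h cd (by simp [hcd])) m]

-- A's clean loop computes the concatenation of the surviving codons
theorem cleanLoop_eq (ns : List Char) (l : List Int) (m : Nat) (acc : List Char)
    (h : m + l.length ≤ (pvChunks3 ns).length) :
    (l.foldl (pvCleanStep ns) (acc, (m : Int) + 1)).1 =
      acc ++ ((((pvChunks3 ns).drop m).take l.length).filter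
                (fun cd => decide (cd ∉ pvStop))).flatten := by
  induction l generalizing m acc with
  | nil => simp
  | cons k l ih =>
      have hm : m < (pvChunks3 ns).length := by simp at h; omega
      obtain ⟨cd, t, hct⟩ : ∃ cd t, (pvChunks3 ns).drop m = cd :: t := by
        cases hd : (pvChunks3 ns).drop m with
        | nil => exact absurd (List.drop_eq_nil_iff.mp hd) (by omega)
        | cons cd t => exact ⟨cd, t, rfl⟩
      have hdm : pvChunks3 (ns.drop (3 * m)) = cd :: t := by rw [chunks3_drop]; exact hct
      have hseg := chunks3_head hdm
      have hslice : PySem.List.slice ns (some (((m : Int) + 1 - 1) * 3)) (some (((m : Int) + 1) * 3))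
          = cd := by
        have e1 : ((m : Int) + 1 - 1) * 3 = ((3 * m : Nat) : Int) := by push_cast; ring
        have e2 : ((m : Int) + 1) * 3 = ((3 * m : Nat) : Int) + ((3 : Nat) : Int) := by push_cast; ring
        rw [e1, e2, PySem.List.slice_natCast_add]
        exact hseg.1
      have hstep : pvCleanStep ns (acc, (m : Int) + 1) k =
          (acc ++ (if cd ∈ pvStop then [] else cd), (m : Int) + 1 + 1) := by
        simp only [pvCleanStep, hslice]
        split_ifs <;> simp
      rw [List.foldl_cons, hstep]
      have e3 : (m : Int) + 1 + 1 = ((m + 1 : Nat) : Int) + 1 := by push_cast; ring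
      rw [e3, ih (m + 1) _ (by simp at h ⊢; omega)]
      have hdm1 : (pvChunks3 ns).drop (m + 1) = t := by
        rw [← List.drop_drop, hct]; simp
      rw [hct, hdm1]
      simp only [List.length_cons, List.take_succ_cons, List.filter_cons]
      by_cases hst : cd ∈ pvStop
      · simp [hst]
      · simp [hst]

-- helper shape of A's align step: the index j enters only through aa_seq[j]
def pvAF (clean : List Char) (st : List Char × Int) (c : Char) : List Char × Int :=
  if c ≠ '-' then
    (st.1 ++ PySem.List.slice clean (some ((st.2 - 1) * 3)) (some (st.2 * 3)), st.2 + 1)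
  else
    (st.1 ++ ['-','-','-'], (st.2 - 1) + 1)

theorem alignStep_eq (aa_seq clean : List Char) :
    pvAlignStep aa_seq clean = fun st j => pvAF clean st (PySem.List.pyGetD aa_seq j ' ') := rfl

-- proof-side model of one '---'/next-codon step (gap keeps the codons, a residue consumes one)
def pvJoinStep (st : List Char × List (List Char)) (c : Char) : List Char × List (List Char) :=
  if c = '-' then (st.1 ++ ['-','-','-'], st.2)
  else match st.2 with
    | [] => (st.1, [])
    | cd :: rest => (st.1 ++ cd, rest)

-- A's alignment loop over char indices = the codon-consuming fold over chars
theorem alignLoop_eq (aa_seq : List Char) (codons : List (List Char))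
    (h3 : ∀ cd ∈ codons, cd.length = 3) (m : Nat) (acc : List Char) :
    (aa_seq.foldl (pvAF codons.flatten) (acc, (m : Int) + 1)).1 =
      (aa_seq.foldl pvJoinStep (acc, codons.drop m)).1 := by
  induction aa_seq generalizing m acc with
  | nil => simp
  | cons c cs ih =>
      by_cases hc : c = '-'
      · have hA : pvAF codons.flatten (acc, (m : Int) + 1) c = (acc ++ ['-','-','-'], (m : Int) + 1) := by
          simp [pvAF, hc]
        have hB : pvJoinStep (acc, codons.drop m) c = (acc ++ ['-','-','-'], codons.drop m) := by
          simp [pvJoinStep, hc]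
        rw [List.foldl_cons, List.foldl_cons, hA, hB, ih]
      · have hslice : PySem.List.slice codons.flatten (some ((m : Int) * 3)) (some (((m : Int) + 1) * 3))
            = (codons.drop m).flatten.take 3 := by
          have e1 : ((m : Int)) * 3 = ((3 * m : Nat) : Int) := by push_cast; ring
          have e2 : ((m : Int) + 1) * 3 = ((3 * m : Nat) : Int) + ((3 : Nat) : Int) := by push_cast; ring
          rw [e1, e2, PySem.List.slice_natCast_add, flatten_drop_of_len3 codons h3]
        rw [List.foldl_cons, List.foldl_cons]
        cases hd : codons.drop m with
        | nil =>
            have hA : pvAF codons.flatten (acc, (m : Int) + 1) c = (acc, (m : Int) + 1 + 1) := by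
              simp [pvAF, hc, hslice, hd]
            have hB : pvJoinStep (acc, ([] : List (List Char))) c = (acc, []) := by
              simp [pvJoinStep, hc]
            have hd1 : codons.drop (m + 1) = [] := by
              rw [← List.drop_drop, hd]; simp
            rw [hA, hB]
            have e3 : (m : Int) + 1 + 1 = ((m + 1 : Nat) : Int) + 1 := by push_cast; ring
            rw [e3, ih (m + 1) acc, hd1]
        | cons cd t =>
            have hcd : cd.length = 3 := h3 cd (List.mem_of_mem_drop (hd ▸ List.mem_cons_self))
            have htake : (codons.drop m).flatten.take 3 = cd := by
              rw [hd]
              simp only [List.flatten_cons]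
              rw [← hcd, List.take_left]
            have hA : pvAF codons.flatten (acc, (m : Int) + 1) c = (acc ++ cd, (m : Int) + 1 + 1) := by
              simp [pvAF, hc, hslice, htake]
            have hB : pvJoinStep (acc, cd :: t) c = (acc ++ cd, t) := by
              simp [pvJoinStep, hc]
            have hd1 : codons.drop (m + 1) = t := by
              rw [← List.drop_drop, hd]; simp
            rw [hA, hB]
            have e3 : (m : Int) + 1 + 1 = ((m + 1 : Nat) : Int) + 1 := by push_cast; ring
            rw [e3, ih (m + 1) (acc ++ cd), hd1]

-- the value of the codon-consuming fold, as a recursion over the chars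
def pvG : List Char → List (List Char) → List Char
  | [], _ => []
  | c :: cs, cods =>
      if c = '-' then '-' :: '-' :: '-' :: pvG cs cods
      else match cods with
        | [] => pvG cs []
        | cd :: rest => cd ++ pvG cs rest

theorem foldl_joinStep (aa : List Char) (acc : List Char) (cods : List (List Char)) :
    (aa.foldl pvJoinStep (acc, cods)).1 = acc ++ pvG aa cods := by
  induction aa generalizing acc cods with
  | nil => simp [pvG]
  | cons c cs ih =>
      by_cases hc : c = '-'
      · simp [pvJoinStep, pvG, hc, ih]
      · cases cods with
        | nil => simp [pvJoinStep, pvG, hc, ih]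
        | cons cd rest => simp [pvJoinStep, pvG, hc, ih]

-- a codon-aligned slice of the flattened codon list is a block of whole codons
theorem slice3 (codons : List (List Char)) (h3 : ∀ cd ∈ codons, cd.length = 3)
    (a n : Nat) :
    PySem.List.slice codons.flatten (some (3 * (a : Int))) (some (3 * ((a : Int) + (n : Int)))) =
      ((codons.drop a).take n).flatten := by
  have e1 : 3 * ((a : Int)) = ((3 * a : Nat) : Int) := by push_cast; ring
  have e2 : 3 * ((a : Int) + (n : Int)) = ((3 * a : Nat) : Int) + ((3 * n : Nat) : Int) := by
    push_cast; ring
  rw [e1, e2, PySem.List.slice_natCast_add, flatten_drop_of_len3 codons h3,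
    flatten_take_of_len3 _ (fun cd hcd => h3 cd (List.mem_of_mem_drop hcd))]

-- B's parts fold, as a recursion over the pieces
def pvPartsRec (clean : List Char) : Nat → List (List Char) → List (List Char)
  | _, [] => []
  | m, p :: ps =>
      PySem.List.slice clean (some (3 * (m : Int))) (some (3 * ((m : Int) + (p.length : Int)))) ::
        pvPartsRec clean (m + p.length) ps

theorem foldl_partStep (clean : List Char) (ps : List (List Char)) (m : Nat)
    (acc : List (List Char)) :
    (ps.foldl (pvPartStep clean) (acc, (m : Int))).1 = acc ++ pvPartsRec clean m ps := by
  induction ps generalizing m acc with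
  | nil => simp [pvPartsRec]
  | cons p ps ih =>
      rw [List.foldl_cons]
      have hstep : pvPartStep clean (acc, (m : Int)) p =
          (acc ++ [PySem.List.slice clean (some (3 * (m : Int)))
            (some (3 * ((m : Int) + (p.length : Int))))], ((m + p.length : Nat) : Int)) := by
        simp [pvPartStep]
      rw [hstep, ih, pvPartsRec]
      simp

theorem intercalate_append_head {α : Type} (sep x y : List α) (t : List (List α)) :
    List.intercalate sep ((x ++ y) :: t) = x ++ List.intercalate sep (y :: t) := by
  cases t with
  | nil => simp [List.intercalate]
  | cons z zs => simp [List.intercalate, List.intersperse]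

theorem intercalate_cons_cons {α : Type} (sep x y : List α) (t : List (List α)) :
    List.intercalate sep (x :: y :: t) = x ++ sep ++ List.intercalate sep (y :: t) := by
  simp [List.intercalate, List.intersperse]

-- one residue consumes exactly the next codon of the remaining block
theorem pvG_cons_residue (c : Char) (hc : c ≠ '-') (cs : List Char)
    (codons : List (List Char)) (m : Nat) :
    pvG (c :: cs) (codons.drop m) =
      ((codons.drop m).take 1).flatten ++ pvG cs (codons.drop (m + 1)) := by
  have hd1 : codons.drop (m + 1) = (codons.drop m).tail := by
    rw [← List.drop_drop]; simp
  cases hd : codons.drop m with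
  | nil => rw [hd1, hd]; simp [pvG, hc]
  | cons cd t => rw [hd1, hd]; simp [pvG, hc]

-- the gap-run decomposition: intercalating the codon-block slices over split('-')
-- rebuilds exactly the codon-consuming walk of the protein chars
theorem parts_eq_pvG (codons : List (List Char)) (h3 : ∀ cd ∈ codons, cd.length = 3)
    (aa : List Char) (m : Nat) :
    List.intercalate ['-','-','-'] (pvPartsRec codons.flatten m (aa.splitOn '-')) =
      pvG aa (codons.drop m) := by
  induction aa generalizing m with
  | nil =>
      simp [List.splitOn_nil, pvPartsRec, List.intercalate, pvG]
      simpa using slice3 codons h3 m 0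
  | cons c cs ih =>
      obtain ⟨q, qs, hq⟩ : ∃ q qs, cs.splitOn '-' = q :: qs := by
        cases h : cs.splitOn '-' with
        | nil => exact absurd h (List.splitOnP_ne_nil _ _)
        | cons q qs => exact ⟨q, qs, rfl⟩
      by_cases hc : c = '-'
      · subst hc
        rw [show ('-' :: cs).splitOn '-' = [] :: cs.splitOn '-' from by
              simp [List.splitOn, List.splitOnP_cons]]
        have h0 : PySem.List.slice codons.flatten (some (3 * (m : Int)))
            (some (3 * ((m : Int) + (([] : List Char).length : Int)))) = [] := by
          simpa using slice3 codons h3 m 0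
        rw [hq, pvPartsRec, h0]
        simp only [List.length_nil, Nat.add_zero]
        have hPR : pvPartsRec codons.flatten m (q :: qs) =
            PySem.List.slice codons.flatten (some (3 * (m : Int)))
              (some (3 * ((m : Int) + (q.length : Int)))) ::
              pvPartsRec codons.flatten (m + q.length) qs := rfl
        rw [hPR, intercalate_cons_cons, ← hPR, ← hq, ih m]
        simp [pvG]
      · rw [show (c :: cs).splitOn '-' = (cs.splitOn '-').modifyHead (c :: ·) from by
              simp [List.splitOn, List.splitOnP_cons, hc]]
        rw [hq]
        simp only [List.modifyHead_cons]
        rw [pvPartsRec]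
        have hS : PySem.List.slice codons.flatten (some (3 * (m : Int)))
            (some (3 * ((m : Int) + (((c :: q).length : Nat) : Int)))) =
            ((codons.drop m).take 1).flatten ++ ((codons.drop (m + 1)).take q.length).flatten := by
          have h1 := slice3 codons h3 m (q.length + 1)
          have e : (((c :: q).length : Nat) : Int) = ((q.length + 1 : Nat) : Int) := by
            simp
          rw [e, h1, show q.length + 1 = 1 + q.length from by omega, List.take_add,
            List.flatten_append, List.drop_drop]
        rw [hS, intercalate_append_head]
        have hS2 : pvPartsRec codons.flatten (m + 1) (q :: qs) =
            ((codons.drop (m + 1)).take q.length).flatten ::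
              pvPartsRec codons.flatten (m + 1 + q.length) qs := by
          rw [pvPartsRec]
          congr 1
          exact slice3 codons h3 (m + 1) q.length
        rw [show m + (c :: q).length = m + 1 + q.length from by simp; omega, ← hS2,
          ← hq, ih (m + 1), ← pvG_cons_residue c hc cs codons m]

-- the two per-row bodies agree (no hypotheses needed: pyGetD with numeral index is getD)
theorem body_eq (arow nrow : List String) : pvBodyA arow nrow = pvBodyB (arow, nrow) := by
  simp only [pvBodyA, pvBodyB, PySem.List.pyGetD_ofNat']
  set aa_seq := (arow.getD 1 "").toList with haa
  set ns := (nrow.getD 1 "").toList with hns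
  set codons := (pvChunks3 ns).filter (fun cd => decide (cd ∉ pvStop)) with hcodons
  have h3 : ∀ cd ∈ codons, cd.length = 3 :=
    fun cd hcd => chunks3_mem_length (List.mem_of_mem_filter hcd)
  have hfd : PySem.Int.floordiv ((ns.length : Nat) : Int) 3 = ((ns.length / 3 : Nat) : Int) := by
    exact_mod_cast PySem.Int.floordiv_natCast ns.length 3
  have hclean :
      ((PySem.List.pyRange 0 (PySem.Int.floordiv ((ns.length : Nat) : Int) 3) 1).foldl
        (pvCleanStep ns) ([], 1)).1 = codons.flatten := by
    rw [hfd]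
    have h := cleanLoop_eq ns (PySem.List.pyRange 0 ((ns.length / 3 : Nat) : Int) 1) 0 []
      (by rw [PySem.List.length_pyRange_one, chunks3_length]; omega)
    simp only [Nat.cast_zero, zero_add] at h
    rw [h, PySem.List.length_pyRange_one]
    have ht : (((ns.length / 3 : Nat) : Int) - 0).toNat = ns.length / 3 := by omega
    rw [ht, ← chunks3_length ns, List.drop_zero, List.take_length, hcodons,
      List.nil_append]
  rw [hclean, alignStep_eq]
  have hfold := PySem.List.foldl_pyRange_zero_pyGetD' aa_seq ' ' (pvAF codons.flatten)
    (([], 1) : List Char × Int)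
  rw [hfold]
  have hA := alignLoop_eq aa_seq codons h3 0 []
  simp only [Nat.cast_zero, zero_add, List.drop_zero] at hA
  rw [hA, foldl_joinStep]
  have hB : ((aa_seq.splitOn '-').foldl (pvPartStep codons.flatten) ([], 0)).1 =
      pvPartsRec codons.flatten 0 (aa_seq.splitOn '-') := by
    have h := foldl_partStep codons.flatten (aa_seq.splitOn '-') 0 []
    simpa using h
  rw [hB]
  have hG := parts_eq_pvG codons h3 aa_seq 0
  rw [List.drop_zero] at hG
  rw [hG, List.nil_append]

-- ===== VERDICT (by name: the statement is the Claim_ definition above) =====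
theorem RevTrans_spec : Claim_equal_RevTrans := by
  intro aa_align nucl _hdom hpre
  obtain ⟨hlen, _hrows⟩ := hpre
  unfold Spec_RevTrans RevTrans RevTrans_alt
  rw [PySem.List.foldl_append_singleton_eq_map
    (fun i => pvBodyA (PySem.List.pyGetD aa_align i []) (PySem.List.pyGetD nucl i []))]
  rw [List.nil_append, PySem.List.pyRange_zero_nat, List.map_map]
  apply List.ext_getElem
  · simp; omega
  · intro i h1 h2
    simp only [List.getElem_map, List.getElem_range, Function.comp_apply, List.getElem_zip]
    have hi : i < aa_align.length := by simpa using h1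
    have hi2 : i < nucl.length := by omega
    rw [PySem.List.pyGetD_natCast, PySem.List.pyGetD_natCast,
      List.getD_eq_getElem _ _ hi, List.getD_eq_getElem _ _ hi2, body_eq]
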